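-- pv_equiv track=rewrite | github.com/idekerlab/llm_evaluation_for_gene_set_interpretation | process_the_gene_ontology.py | filter_termlist
-- ===== SOURCE A (Python) =====
-- NAMESPACE = 'namespace: '
--
-- ID = 'id: '
--
-- ID_OFFSET = len(ID)
--
-- ALT_ID = 'alt_id: '
--
-- ALT_ID_OFFSET = len(ALT_ID)
--
-- IS_OBSOLETE = 'is_obsolete: '
--
-- def filter_termlist(term_list=None, go_ids_to_skip=None,
--                     keep_obsolete=False,
--                     namespace=None):
--     """
--
--     :param term_list:
--     :return:
--     """
--     skip_term = False
--     go_ids = set()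
--     for entry in term_list:
--         if entry.startswith(ID):
--             go_ids.add(entry[ID_OFFSET:].strip())
--         elif entry.startswith(ALT_ID):
--             go_ids.add(entry[ALT_ID_OFFSET:].strip())
--         elif keep_obsolete is False and entry.startswith(IS_OBSOLETE):
--             if 'true' in entry:
--                 skip_term = True
--         elif namespace is not None and namespace != '' and entry.startswith(NAMESPACE):
--             if namespace not in entry:
--                 skip_term = True
--
--     if skip_term is True:
--         go_ids_to_skip.update(go_ids)
--     return skip_term
-- ===== SOURCE B (Python) =====
-- NAMESPACE = 'namespace: '
-- ID = 'id: '
-- ID_OFFSET = len(ID)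
-- ALT_ID = 'alt_id: '
-- ALT_ID_OFFSET = len(ALT_ID)
-- IS_OBSOLETE = 'is_obsolete: '
--
-- def filter_termlist(term_list=None, go_ids_to_skip=None,
--                     keep_obsolete=False,
--                     namespace=None):
--     skip_term = (keep_obsolete is False and
--                  any('true' in e for e in term_list if e.startswith(IS_OBSOLETE))) or \
--                 (namespace is not None and namespace != '' and
--                  any(namespace not in e for e in term_list if e.startswith(NAMESPACE)))
--     if skip_term:
--         go_ids = {e[ID_OFFSET:].strip() for e in term_list if e.startswith(ID)} | \
--                  {e[ALT_ID_OFFSET:].strip() for e in term_list if e.startswith(ALT_ID)}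
--         go_ids_to_skip.update(go_ids)
--     return skip_term
-- ===== Notes on version B (the rewrite author's own statement) =====
-- stated objective: alternative
-- what changed: A's single pass accumulating a skip flag and go_ids together is replaced by computing skip_term as the OR of two independent guarded any() scans (obsolete entries containing 'true'; namespace entries missing the namespace), building and updating go_ids only when skip_term is true.
import Mathlib
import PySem

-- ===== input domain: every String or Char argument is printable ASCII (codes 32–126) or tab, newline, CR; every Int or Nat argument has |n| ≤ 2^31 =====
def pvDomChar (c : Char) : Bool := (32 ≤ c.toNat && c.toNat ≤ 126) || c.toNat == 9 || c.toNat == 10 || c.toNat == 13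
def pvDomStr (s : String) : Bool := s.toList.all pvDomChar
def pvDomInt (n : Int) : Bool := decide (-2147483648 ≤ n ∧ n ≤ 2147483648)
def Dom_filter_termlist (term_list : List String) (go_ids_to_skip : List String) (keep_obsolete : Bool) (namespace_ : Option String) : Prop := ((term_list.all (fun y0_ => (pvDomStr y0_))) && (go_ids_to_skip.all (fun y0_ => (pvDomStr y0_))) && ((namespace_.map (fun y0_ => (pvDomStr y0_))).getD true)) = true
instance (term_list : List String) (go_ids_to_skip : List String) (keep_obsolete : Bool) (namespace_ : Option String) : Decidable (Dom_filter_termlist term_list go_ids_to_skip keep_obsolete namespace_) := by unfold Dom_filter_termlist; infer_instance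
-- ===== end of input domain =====

-- B replaces A's single flag-accumulating loop by two independent any() scans (obsolete / namespace)
-- combined with the guards, building go_ids only when needed; equivalence is about the RETURN value
-- only (both Pythons perform the same go_ids_to_skip.update side effect when the result is True).

-- ===== PORT A =====
-- the loop body of A's single pass, carrying (skip_term, go_ids)
def ftl_step (keep_obsolete : Bool) (namespace_ : Option String)
    (st : Bool × PySem.Set String) (entry : String) : Bool × PySem.Set String :=
  if PySem.Str.startswith entry "id: " then
    (st.1, st.2.add (PySem.Str.strip (PySem.Str.slice entry (some 4) none)))
  else if PySem.Str.startswith entry "alt_id: " then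
    (st.1, st.2.add (PySem.Str.strip (PySem.Str.slice entry (some 8) none)))
  else if !keep_obsolete && PySem.Str.startswith entry "is_obsolete: " then
    (if PySem.Str.isIn "true" entry then true else st.1, st.2)
  else
    match namespace_ with
    | none => st
    | some ns =>
      if (ns != "") && PySem.Str.startswith entry "namespace: " then
        (if !PySem.Str.isIn ns entry then true else st.1, st.2)
      else st

def filter_termlist (term_list : List String) (go_ids_to_skip : List String) (keep_obsolete : Bool) (namespace_ : Option String) : Bool :=
  (term_list.foldl (ftl_step keep_obsolete namespace_) (false, PySem.Set.empty)).1

-- ===== PORT B =====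
def filter_termlist_alt (term_list : List String) (go_ids_to_skip : List String) (keep_obsolete : Bool) (namespace_ : Option String) : Bool :=
  (!keep_obsolete &&
    term_list.any (fun e => PySem.Str.startswith e "is_obsolete: " && PySem.Str.isIn "true" e))
  || (match namespace_ with
      | none => false
      | some ns =>
        (ns != "") &&
          term_list.any (fun e => PySem.Str.startswith e "namespace: " && !PySem.Str.isIn ns e))

-- ===== PRECONDITION & SPEC =====
def Spec_filter_termlist (term_list : List String) (go_ids_to_skip : List String) (keep_obsolete : Bool) (namespace_ : Option String) (out : Bool) : Prop := out = filter_termlist_alt term_list go_ids_to_skip keep_obsolete namespace_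
instance (term_list : List String) (go_ids_to_skip : List String) (keep_obsolete : Bool) (namespace_ : Option String) (out : Bool) : Decidable (Spec_filter_termlist term_list go_ids_to_skip keep_obsolete namespace_ out) := by unfold Spec_filter_termlist; infer_instance

-- ===== CLAIM (what is proved, stated in full; the proofs are below) =====
def Claim_equal_filter_termlist : Prop := ∀ (term_list : List String) (go_ids_to_skip : List String) (keep_obsolete : Bool) (namespace_ : Option String), Dom_filter_termlist term_list go_ids_to_skip keep_obsolete namespace_ → Spec_filter_termlist term_list go_ids_to_skip keep_obsolete namespace_ (filter_termlist term_list go_ids_to_skip keep_obsolete namespace_)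

-- ===== LEMMAS AND PROOFS =====

-- two incomparable literal prefixes cannot both start the same string
lemma ftl_sw_excl {e : String} (p q : String)
    (h : PySem.Str.startswith e p = true)
    (hn : ¬ (p.toList <+: q.toList ∨ q.toList <+: p.toList)) :
    PySem.Str.startswith e q = false := by
  by_contra hq
  rw [Bool.not_eq_false, PySem.Str.startswith_eq, PySem.Chars.startswith_iff] at hq
  rw [PySem.Str.startswith_eq, PySem.Chars.startswith_iff] at h
  exact hn (List.prefix_or_prefix_of_prefix h hq)

-- B's per-entry skip contribution
def ftl_flag (keep_obsolete : Bool) (namespace_ : Option String) (e : String) : Bool :=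
  (!keep_obsolete && (PySem.Str.startswith e "is_obsolete: " && PySem.Str.isIn "true" e))
  || (match namespace_ with
      | none => false
      | some ns => (ns != "") && (PySem.Str.startswith e "namespace: " && !PySem.Str.isIn ns e))

lemma ftl_alt_eq_any (term_list go_ids_to_skip : List String) (k : Bool) (nso : Option String) :
    filter_termlist_alt term_list go_ids_to_skip k nso = term_list.any (ftl_flag k nso) := by
  induction term_list with
  | nil => cases nso <;> simp [filter_termlist_alt, ftl_flag]
  | cons e t ih =>
    cases nso with
    | none =>
      simp only [filter_termlist_alt, List.any_cons, ftl_flag] at *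
      rw [Bool.and_or_distrib_left]
      cases !k && (PySem.Str.startswith e "is_obsolete: " && PySem.Str.isIn "true" e) <;> simp_all
    | some ns =>
      simp only [filter_termlist_alt, List.any_cons, ftl_flag] at *
      rw [Bool.and_or_distrib_left, Bool.and_or_distrib_left]
      cases !k && (PySem.Str.startswith e "is_obsolete: " && PySem.Str.isIn "true" e) <;>
        cases (ns != "") && (PySem.Str.startswith e "namespace: " && !PySem.Str.isIn ns e) <;>
        simp_all

lemma ftl_step_fst (k : Bool) (nso : Option String) (st : Bool × PySem.Set String) (e : String) :
    (ftl_step k nso st e).1 = (st.1 || ftl_flag k nso e) := by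
  unfold ftl_step ftl_flag
  cases hs1 : PySem.Str.startswith e "id: " with
  | true =>
    have h3 := ftl_sw_excl "id: " "is_obsolete: " hs1 (by decide)
    have h4 := ftl_sw_excl "id: " "namespace: " hs1 (by decide)
    cases nso <;> simp only [hs1, h3, h4, if_true, Bool.and_false, Bool.false_and,
      Bool.and_true, Bool.false_eq_true, if_false, Bool.or_false] <;> try simp
  | false =>
    cases hs2 : PySem.Str.startswith e "alt_id: " with
    | true =>
      have h3 := ftl_sw_excl "alt_id: " "is_obsolete: " hs2 (by decide)
      have h4 := ftl_sw_excl "alt_id: " "namespace: " hs2 (by decide)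
      cases nso <;> simp only [hs1, hs2, h3, h4, if_true, Bool.and_false, Bool.false_and,
        Bool.and_true, Bool.false_eq_true, if_false, Bool.or_false] <;> try simp
    | false =>
      cases hs3 : PySem.Str.startswith e "is_obsolete: " with
      | true =>
        have h4 := ftl_sw_excl "is_obsolete: " "namespace: " hs3 (by decide)
        cases nso <;> cases k <;> cases hin : PySem.Str.isIn "true" e <;>
          simp only [hs1, hs2, hs3, h4, hin] <;> cases hst : st.1 <;> simp [hst]
      | false =>
        cases nso with
        | none => cases k <;> simp [hs1, hs2, hs3]
        | some ns =>
          cases hs4 : PySem.Str.startswith e "namespace: " <;>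
            cases hne : (ns != "") <;>
            cases hin : PySem.Str.isIn ns e <;>
            cases k <;>
            simp only [hs1, hs2, hs3, hs4, hne, hin] <;> cases hst : st.1 <;> simp [hst]

lemma ftl_loop_fst (k : Bool) (nso : Option String) :
    ∀ (l : List String) (s0 : Bool) (g0 : PySem.Set String),
      (l.foldl (ftl_step k nso) (s0, g0)).1 = (s0 || l.any (ftl_flag k nso)) := by
  intro l
  induction l with
  | nil => simp
  | cons e t ih =>
    intro s0 g0
    simp only [List.foldl_cons, List.any_cons]
    rw [← Prod.mk.eta (p := ftl_step k nso (s0, g0) e), ih, ftl_step_fst, Bool.or_assoc]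

-- ===== VERDICT (by name: the statement is the Claim_ definition above) =====
theorem filter_termlist_spec : Claim_equal_filter_termlist := by
  intro term_list go_ids_to_skip keep_obsolete namespace_ _
  unfold Spec_filter_termlist filter_termlist
  rw [ftl_loop_fst, Bool.false_or, ftl_alt_eq_any]
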